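-- pv_equiv track=rewrite | github.com/VanXNF/MLHK | hw_1.py | cal_attr_num
-- ===== SOURCE A (Python) =====
-- def cal_attr_num(dataset, attr_index):
--     """
--     计算各属性在数据集中的占比\n
--     :param dataset: 数据集
--     :param attr_index: 属性位置 (0-59)
--     :return: [A,C,G,T] 各取值数量
--     """
--     attr_num = [0, 0, 0, 0]
--     for item in dataset:
--         if item[attr_index] == 'A':
--             attr_num[0] += 1
--         elif item[attr_index] == 'C':
--             attr_num[1] += 1
--         elif item[attr_index] == 'G':
--             attr_num[2] += 1
--         elif item[attr_index] == 'T':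
--             attr_num[3] += 1
--     return attr_num
-- ===== SOURCE B (Python) =====
-- def cal_attr_num(dataset, attr_index):
--     return [sum(1 for item in dataset if item[attr_index] == ch) for ch in 'ACGT']
-- ===== Notes on version B (the rewrite author's own statement) =====
-- stated objective: idiomatic
-- what changed: Replaces the single accumulating loop with if/elif branch dispatch into a mutable 4-slot list by a comprehension over 'ACGT' that computes each count as its own filtered sum pass.
import Mathlib
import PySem

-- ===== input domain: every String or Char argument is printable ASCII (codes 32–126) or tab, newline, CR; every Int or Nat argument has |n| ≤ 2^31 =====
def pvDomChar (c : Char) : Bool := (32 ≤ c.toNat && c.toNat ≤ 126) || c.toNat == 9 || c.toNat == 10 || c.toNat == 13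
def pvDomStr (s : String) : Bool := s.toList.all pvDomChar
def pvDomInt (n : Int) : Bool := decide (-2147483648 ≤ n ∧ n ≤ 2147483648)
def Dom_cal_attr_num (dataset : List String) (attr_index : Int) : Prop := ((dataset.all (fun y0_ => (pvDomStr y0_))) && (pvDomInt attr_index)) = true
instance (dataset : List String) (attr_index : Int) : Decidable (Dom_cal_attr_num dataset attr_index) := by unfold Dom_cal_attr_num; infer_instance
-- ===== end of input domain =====

-- B replaces A's single accumulating branch-dispatch loop by one filtered counting pass per
-- nucleotide (comprehension over 'ACGT'); same return value, no speed claim.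

-- ===== PORT A =====
-- the loop body: dispatch on item[attr_index] and bump the matching slot of attr_num
def calAttrStep (attr_index : Int) (attr_num : List Int) (item : String) : List Int :=
  match PySem.Str.pyGet? item attr_index with
  | none => attr_num        -- Python raises IndexError here; excluded by Pre_
  | some ch =>
    if ch = 'A' then attr_num.set 0 (attr_num.getD 0 0 + 1)
    else if ch = 'C' then attr_num.set 1 (attr_num.getD 1 0 + 1)
    else if ch = 'G' then attr_num.set 2 (attr_num.getD 2 0 + 1)
    else if ch = 'T' then attr_num.set 3 (attr_num.getD 3 0 + 1)
    else attr_num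

def cal_attr_num (dataset : List String) (attr_index : Int) : List Int :=
  dataset.foldl (calAttrStep attr_index) [0, 0, 0, 0]

-- ===== PORT B =====
def cal_attr_num_alt (dataset : List String) (attr_index : Int) : List Int :=
  ['A', 'C', 'G', 'T'].map (fun ch =>
    (dataset.countP (fun item => PySem.Str.pyGet? item attr_index == some ch) : Int))

-- ===== PRECONDITION & SPEC =====
-- Pre_: every item admits the index (otherwise Python A — and Python B — raise IndexError)
def Pre_cal_attr_num (dataset : List String) (attr_index : Int) : Prop :=
  ∀ item ∈ dataset, PySem.Raise.InRange item.toList.length attr_index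
instance (dataset : List String) (attr_index : Int) : Decidable (Pre_cal_attr_num dataset attr_index) := by unfold Pre_cal_attr_num; infer_instance
def pvWitness_cal_attr_num : List String × Int := (["ACG", "TGA", "CCC"], 1)
def Spec_cal_attr_num (dataset : List String) (attr_index : Int) (out : List Int) : Prop := out = cal_attr_num_alt dataset attr_index
instance (dataset : List String) (attr_index : Int) (out : List Int) : Decidable (Spec_cal_attr_num dataset attr_index out) := by unfold Spec_cal_attr_num; infer_instance

-- ===== CLAIM (what is proved, stated in full; the proofs are below) =====
def Claim_equal_cal_attr_num : Prop := ∀ (dataset : List String) (attr_index : Int), Dom_cal_attr_num dataset attr_index → Pre_cal_attr_num dataset attr_index → Spec_cal_attr_num dataset attr_index (cal_attr_num dataset attr_index)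

-- ===== LEMMAS AND PROOFS =====
-- count one nucleotide (B's per-character pass)
def calCnt (attr_index : Int) (ch : Char) (l : List String) : Int :=
  (l.countP (fun item => PySem.Str.pyGet? item attr_index == some ch) : Int)

theorem calCnt_cons (attr_index : Int) (ch : Char) (x : String) (l : List String) :
    calCnt attr_index ch (x :: l) =
      (if PySem.Str.pyGet? x attr_index == some ch then 1 else 0) + calCnt attr_index ch l := by
  simp [calCnt, List.countP_cons]
  split_ifs <;> push_cast <;> ring

-- invariant of A's fold: starting from [a,c,g,t] it adds the four per-character counts
theorem fold_eq_counts (attr_index : Int) (l : List String) :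
    ∀ a c g t : Int,
      l.foldl (calAttrStep attr_index) [a, c, g, t] =
        [a + calCnt attr_index 'A' l, c + calCnt attr_index 'C' l,
         g + calCnt attr_index 'G' l, t + calCnt attr_index 'T' l] := by
  induction l with
  | nil => intro a c g t; simp [calCnt]
  | cons x l ih =>
    intro a c g t
    simp only [List.foldl_cons, calAttrStep, calCnt_cons]
    cases h : PySem.Str.pyGet? x attr_index with
    | none =>
      simp [ih]
    | some ch =>
      by_cases hA : ch = 'A'
      · simp [hA, ih, List.set]
        all_goals ring
      · by_cases hC : ch = 'C'
        · simp [hC, ih, List.set]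
          all_goals ring
        · by_cases hG : ch = 'G'
          · simp [hG, ih, List.set]
            all_goals ring
          · by_cases hT : ch = 'T'
            · simp [hT, ih, List.set]
              all_goals ring
            · simp [hA, hC, hG, hT, ih]

-- ===== VERDICT (by name: the statement is the Claim_ definition above) =====
theorem cal_attr_num_spec : Claim_equal_cal_attr_num := by
  intro dataset attr_index _ _
  unfold Spec_cal_attr_num cal_attr_num cal_attr_num_alt
  rw [fold_eq_counts]
  simp [calCnt]
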